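-- pv_equiv track=rewrite | github.com/Svilka7aa/softuni_python_advanced | exam_preparation/list_pureness.py | best_list_pureness
-- ===== SOURCE A (Python) =====
-- from collections import deque
--
-- def switch_values(list):
--     last = list[-1]
--     list.appendleft(last)
--     list.pop()
--     return list
--
-- def best_list_pureness(*args):
--     list_of_numbers = deque(args[0])
--     rotations = args[1]
--     rotation = 0
--     pureness_dict = {}
--     purity = 0
--
--     while rotations >= rotation:
--         pureness = 0
--         for idx, value in enumerate(list_of_numbers):
--             pureness += idx * value
--         pureness_dict[rotation] = pureness
--         rotation += 1
--
--         list_of_numbers = switch_values(list_of_numbers)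
--
--     rotations_needed = []
--     for key, value in pureness_dict.items():
--         if value == max(pureness_dict.values()):
--             purity = value
--             rotations_needed.append(key)
--
--     return f"Best pureness {purity} after {rotations_needed[0]} rotations"
-- ===== SOURCE B (Python) =====
-- def best_list_pureness(*args):
--     nums = list(args[0])
--     r = args[1]
--     n = len(nums)
--     total = sum(nums)
--     p = sum(i * v for i, v in enumerate(nums))
--     best, best_k = p, 0
--     pos = n - 1
--     for k in range(1, r + 1):
--         p += total - n * nums[pos]
--         pos = pos - 1 if pos else n - 1
--         if p > best:
--             best, best_k = p, k
--     return f"Best pureness {best} after {best_k} rotations"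
-- ===== Notes on version B (the rewrite author's own statement) =====
-- stated objective: faster
-- what changed: B replaces A's per-rotation O(n) recomputation of the weighted-index sum over a mutated deque (plus a dict of all rotation scores scanned with max() recomputed per entry) by the O(1) incremental update pureness += sum - n*last per rotation with a running max, giving O(n + r) instead of O(n*r).
-- crash fix: On rotations < 0 (and on the empty list with rotations = 0) A raises IndexError (empty rotations_needed / popping an empty deque) while B returns the pureness of the unrotated list, e.g. 'Best pureness 0 after 0 rotations'. — e.g. on best_list_pureness([], 0): A raises IndexError, B returns "Best pureness 0 after 0 rotations"
import Mathlib
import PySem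

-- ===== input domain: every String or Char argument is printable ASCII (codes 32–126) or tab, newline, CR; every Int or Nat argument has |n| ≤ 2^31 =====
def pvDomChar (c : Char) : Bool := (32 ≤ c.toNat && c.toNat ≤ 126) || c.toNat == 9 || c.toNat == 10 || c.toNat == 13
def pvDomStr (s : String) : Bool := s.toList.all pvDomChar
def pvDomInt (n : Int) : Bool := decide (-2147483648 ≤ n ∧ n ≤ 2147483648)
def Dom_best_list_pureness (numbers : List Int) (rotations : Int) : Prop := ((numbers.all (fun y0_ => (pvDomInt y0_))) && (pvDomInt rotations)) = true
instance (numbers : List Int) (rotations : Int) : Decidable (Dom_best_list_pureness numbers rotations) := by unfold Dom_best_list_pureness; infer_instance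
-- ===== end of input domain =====

-- B replaces A's O(n) recomputation of the weighted sum for each of the r+1 rotations by an O(1)
-- incremental update with a running maximum (O(n + r) instead of O(n*r)); equal output proved on Pre_.

-- ===== PORT A =====
-- switch_values: move the deque's last element to the front.  Python raises IndexError on an empty
-- deque (list[-1]); those inputs are outside Pre_, here the empty list is returned unchanged.
def switch_values (l : List Int) : List Int :=
  match l.getLast? with
  | some last => last :: l.dropLast
  | none => []

-- the 'while rotations >= rotation' loop; fuel = number of remaining iterations
def pureLoop : Nat → Int → List Int → PySem.Dict Int Int → PySem.Dict Int Int
  | 0, _, _, d => d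
  | f + 1, rotation, l, d =>
    let pureness := (PySem.List.enumerate l 0).foldl (fun acc p => acc + p.1 * p.2) 0
    pureLoop f (rotation + 1) (switch_values l) (d.insert rotation pureness)

def best_list_pureness (numbers : List Int) (rotations : Int) : String :=
  let d := pureLoop (rotations + 1).toNat 0 numbers PySem.Dict.empty
  -- max() raises ValueError on an empty dict and rotations_needed[0] raises IndexError on the empty
  -- list; both happen only outside Pre_, where '.getD 0' stands in for the exception.
  let res := d.items.foldl
    (fun (st : Int × List Int) kv =>
      if kv.2 == (PySem.List.max? d.values (fun y => y)).getD 0 then (kv.2, st.2 ++ [kv.1]) else st)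
    (0, [])
  "Best pureness " ++ PySem.Int.toStr res.1 ++ " after " ++
    PySem.Int.toStr ((PySem.List.pyGet? res.2 0).getD 0) ++ " rotations"

-- ===== PORT B =====
-- state = (p, best, best_k, pos); nums[pos] raises only for empty nums (outside Pre_), '.getD 0' stands in
def best_list_pureness_alt (numbers : List Int) (rotations : Int) : String :=
  let n : Int := numbers.length
  let total := numbers.sum
  let p0 := (PySem.List.enumerate numbers 0).foldl (fun acc q => acc + q.1 * q.2) 0
  let st := (PySem.List.pyRange 1 (rotations + 1) 1).foldl
    (fun (st : Int × Int × Int × Int) k =>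
      let p := st.1 + total - n * (PySem.List.pyGet? numbers st.2.2.2).getD 0
      let pos := if st.2.2.2 ≠ 0 then st.2.2.2 - 1 else n - 1
      if p > st.2.1 then (p, p, k, pos) else (p, st.2.1, st.2.2.1, pos))
    (p0, p0, 0, n - 1)
  "Best pureness " ++ PySem.Int.toStr st.2.1 ++ " after " ++
    PySem.Int.toStr st.2.2.1 ++ " rotations"

-- ===== PRECONDITION & SPEC =====
-- A raises IndexError on the empty list (switch_values pops it) and on rotations < 0
-- (rotations_needed stays empty); exactly those inputs are excluded.
def Pre_best_list_pureness (numbers : List Int) (rotations : Int) : Prop :=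
  numbers ≠ [] ∧ 0 ≤ rotations
instance (numbers : List Int) (rotations : Int) : Decidable (Pre_best_list_pureness numbers rotations) := by unfold Pre_best_list_pureness; infer_instance
def pvWitness_best_list_pureness : List Int × Int := ([1, 2, 3], 2)

-- On rotations < 0 (and on the empty list with rotations = 0) A raises IndexError while B returns
-- the pureness of the unrotated list after 0 rotations.
def Raises_best_list_pureness (numbers : List Int) (rotations : Int) : Prop :=
  rotations < 0 ∨ (numbers = [] ∧ rotations = 0)
instance (numbers : List Int) (rotations : Int) : Decidable (Raises_best_list_pureness numbers rotations) := by unfold Raises_best_list_pureness; infer_instance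
def pvRaiseWitness_best_list_pureness : List Int × Int := ([], 0)
def pvRaiseWitnessOut_best_list_pureness : String := "Best pureness 0 after 0 rotations"

def Spec_best_list_pureness (numbers : List Int) (rotations : Int) (out : String) : Prop := out = best_list_pureness_alt numbers rotations
instance (numbers : List Int) (rotations : Int) (out : String) : Decidable (Spec_best_list_pureness numbers rotations out) := by unfold Spec_best_list_pureness; infer_instance

-- ===== CLAIM (what is proved, stated in full; the proofs are below) =====
def Claim_equal_best_list_pureness : Prop := ∀ (numbers : List Int) (rotations : Int), Dom_best_list_pureness numbers rotations → Pre_best_list_pureness numbers rotations → Spec_best_list_pureness numbers rotations (best_list_pureness numbers rotations)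
def Claim_raises_best_list_pureness : Prop := (∀ (numbers : List Int) (rotations : Int), Dom_best_list_pureness numbers rotations → Raises_best_list_pureness numbers rotations → ¬ Pre_best_list_pureness numbers rotations) ∧ (Dom_best_list_pureness (pvRaiseWitness_best_list_pureness.1) (pvRaiseWitness_best_list_pureness.2) ∧ Raises_best_list_pureness (pvRaiseWitness_best_list_pureness.1) (pvRaiseWitness_best_list_pureness.2) ∧ best_list_pureness_alt (pvRaiseWitness_best_list_pureness.1) (pvRaiseWitness_best_list_pureness.2) = pvRaiseWitnessOut_best_list_pureness)

-- ===== LEMMAS AND PROOFS =====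

-- weighted-index sum of a list (the quantity both programs call 'pureness')
def WS (l : List Int) : Int := (PySem.List.enumerate l 0).foldl (fun acc p => acc + p.1 * p.2) 0
-- the same as a sum, with a general start index
def SW (l : List Int) (s : Int) : Int := ((PySem.List.enumerate l s).map (fun p => p.1 * p.2)).sum
-- pureness after k rotations
def Prot (nums : List Int) (k : Nat) : Int := WS (switch_values^[k] nums)
-- running maximum of Prot over 0..j and the first index attaining it
def bestP (nums : List Int) : Nat → Int
  | 0 => Prot nums 0
  | j + 1 => max (bestP nums j) (Prot nums (j + 1))
def argP (nums : List Int) : Nat → Nat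
  | 0 => 0
  | j + 1 => if bestP nums j < Prot nums (j + 1) then j + 1 else argP nums j

lemma WS_eq_SW (l : List Int) : WS l = SW l 0 := by
  unfold WS SW; rw [PySem.List.foldl_add]; simp

lemma SW_cons (x : Int) (t : List Int) (s : Int) : SW (x :: t) s = s * x + SW t (s + 1) := by
  simp [SW, PySem.List.enumerate_cons]

lemma SW_shift (t : List Int) (s : Int) : SW t (s + 1) = SW t s + t.sum := by
  induction t generalizing s with
  | nil => simp [SW, PySem.List.enumerate_nil]
  | cons a t ih =>
    rw [SW_cons, SW_cons, ih (s + 1), List.sum_cons]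
    ring

lemma SW_concat (t : List Int) (x : Int) (s : Int) :
    SW (t ++ [x]) s = SW t s + (s + t.length) * x := by
  induction t generalizing s with
  | nil => simp [SW, PySem.List.enumerate_cons, PySem.List.enumerate_nil]
  | cons a t ih =>
    rw [List.cons_append, SW_cons, SW_cons, ih (s + 1)]
    push_cast [List.length_cons]
    ring

-- the O(1) update B uses: rotating the last element to the front
lemma WS_switch (l : List Int) (x : Int) (hx : l.getLast? = some x) :
    WS (switch_values l) = WS l + l.sum - l.length * x := by
  have hne : l ≠ [] := by rintro rfl; simp at hx
  have hx' : l.getLast hne = x := by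
    rw [List.getLast?_eq_some_getLast hne] at hx; exact Option.some.inj hx
  have hsw : switch_values l = x :: l.dropLast := by unfold switch_values; rw [hx]
  have hl : l.dropLast ++ [x] = l := hx' ▸ List.dropLast_append_getLast hne
  calc WS (switch_values l) = WS (x :: l.dropLast) := by rw [hsw]
    _ = WS (l.dropLast ++ [x]) + (l.dropLast ++ [x]).sum - (l.dropLast ++ [x]).length * x := by
        rw [WS_eq_SW, WS_eq_SW, SW_cons, SW_concat]
        have := SW_shift l.dropLast 0
        norm_num at this ⊢
        rw [this]
        ring
    _ = WS l + l.sum - l.length * x := by rw [hl]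

lemma mod_succ_eq (j n : Nat) (hn : 0 < n) :
    (j + 1) % n = if j % n = n - 1 then 0 else j % n + 1 := by
  have h1 : j % n < n := Nat.mod_lt _ hn
  have h2 : (j + 1) % n = (j % n + 1) % n := by
    conv_lhs => rw [← Nat.mod_add_div j n]
    rw [Nat.add_right_comm, Nat.add_mul_mod_self_left]
  by_cases hc : j % n = n - 1
  · rw [if_pos hc, h2, hc]
    have : n - 1 + 1 = n := by omega
    rw [this, Nat.mod_self]
  · rw [if_neg hc, h2, Nat.mod_eq_of_lt (by omega)]

-- shape of the deque after j rotations
lemma iterate_switch (nums : List Int) (h : nums ≠ []) (j : Nat) :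
    switch_values^[j] nums =
      nums.drop (nums.length - 1 - j % nums.length + 1) ++
      nums.take (nums.length - 1 - j % nums.length + 1) := by
  have hn : 0 < nums.length := List.length_pos_iff.mpr h
  induction j with
  | zero =>
    simp only [Function.iterate_zero, id_eq, Nat.zero_mod, Nat.sub_zero]
    have : nums.length - 1 + 1 = nums.length := by omega
    rw [this]
    simp
  | succ j ih =>
    set m := nums.length - 1 - j % nums.length with hm
    have hmlt : m < nums.length := by
      have := Nat.mod_lt j hn
      omega
    have htake : nums.take (m + 1) = nums.take m ++ [nums[m]] := by
      rw [List.take_add_one, List.getElem?_eq_getElem hmlt]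
      simp
    have hdrop : nums.drop m = nums[m] :: nums.drop (m + 1) := List.drop_eq_getElem_cons hmlt
    rw [Function.iterate_succ_apply', ih]
    have hsw : switch_values (nums.drop (m + 1) ++ nums.take (m + 1)) =
        nums.drop m ++ nums.take m := by
      rw [htake, ← List.append_assoc]
      unfold switch_values
      rw [List.getLast?_concat, List.dropLast_concat]
      rw [hdrop]
      rfl
    rw [hsw]
    rw [mod_succ_eq j nums.length hn]
    by_cases hc : j % nums.length = nums.length - 1
    · rw [if_pos hc]
      have hm0 : m = 0 := by omega
      simp only [Nat.sub_zero]
      have h1 : nums.length - 1 + 1 = nums.length := by omega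
      rw [h1, hm0]
      simp
    · rw [if_neg hc]
      have hjm := Nat.mod_lt j hn
      have : nums.length - 1 - (j % nums.length + 1) + 1 = m := by omega
      rw [this]

lemma Prot_succ (nums : List Int) (h : nums ≠ []) (j : Nat) :
    Prot nums (j + 1) =
      Prot nums j + nums.sum -
        (nums.length : Int) * nums.getD (nums.length - 1 - j % nums.length) 0 := by
  have hn : 0 < nums.length := List.length_pos_iff.mpr h
  have hmlt : nums.length - 1 - j % nums.length < nums.length := by
    have := Nat.mod_lt j hn
    omega
  set m := nums.length - 1 - j % nums.length with hm
  have hrot := iterate_switch nums h j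
  have hlast : (switch_values^[j] nums).getLast? = some nums[m] := by
    rw [hrot, List.take_add_one, List.getElem?_eq_getElem hmlt]
    simp [← List.append_assoc]
  have hlen : (switch_values^[j] nums).length = nums.length := by
    rw [hrot]
    simp
    omega
  have hsum : (switch_values^[j] nums).sum = nums.sum := by
    rw [hrot, List.sum_append, add_comm, List.sum_take_add_sum_drop]
  unfold Prot
  rw [Function.iterate_succ_apply', WS_switch _ _ hlast, hlen, hsum,
    List.getD_eq_getElem _ _ hmlt]

lemma argP_le (nums : List Int) (j : Nat) : argP nums j ≤ j := by
  induction j with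
  | zero => simp [argP]
  | succ j ih =>
    unfold argP
    split_ifs
    · omega
    · omega

lemma Prot_argP (nums : List Int) (j : Nat) : Prot nums (argP nums j) = bestP nums j := by
  induction j with
  | zero => simp [argP, bestP]
  | succ j ih =>
    simp only [argP, bestP]
    split_ifs with hc
    · exact (max_eq_right hc.le).symm
    · rw [ih]
      exact (max_eq_left (not_lt.mp hc)).symm

lemma Prot_le_bestP (nums : List Int) (j : Nat) : ∀ i ≤ j, Prot nums i ≤ bestP nums j := by
  induction j with
  | zero =>
    intro i hi
    interval_cases i
    simp [bestP]
  | succ j ih =>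
    intro i hi
    unfold bestP
    rcases Nat.lt_or_ge i (j + 1) with hlt | hge
    · exact le_trans (ih i (by omega)) (le_max_left _ _)
    · have : i = j + 1 := by omega
      rw [this]
      exact le_max_right _ _

lemma Prot_lt_of_lt_argP (nums : List Int) (j : Nat) :
    ∀ i < argP nums j, Prot nums i < bestP nums j := by
  induction j with
  | zero => simp [argP]
  | succ j ih =>
    intro i hi
    unfold bestP
    unfold argP at hi
    split_ifs at hi with hc
    · have := Prot_le_bestP nums j i (by omega)
      rw [max_def]
      split_ifs <;> omega
    · have := ih i hi
      rw [max_def]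
      split_ifs <;> omega

-- A's dict after the loop: items are ((0, P 0), …, (F-1, P (F-1)))
lemma pureLoop_items (f : Nat) : ∀ (r : Int) (l : List Int) (d : PySem.Dict Int Int),
    (∀ j : Nat, j < f → d.contains (r + (j : Int)) = false) →
    (pureLoop f r l d).items =
      d.items ++ (List.range f).map (fun (j : Nat) => (r + (j : Int), WS (switch_values^[j] l))) := by
  induction f with
  | zero => intro r l d hc; simp [pureLoop]
  | succ f ih =>
    intro r l d hc
    show (pureLoop f (r + 1) (switch_values l) (d.insert r (WS l))).items = _
    rw [ih (r + 1) (switch_values l) _ ?_]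
    · rw [PySem.Dict.items_insert_of_not_contains d (WS l)
        (by have := hc 0 (by omega); simpa using this)]
      rw [List.append_assoc]
      congr 1
      rw [List.range_succ_eq_map, List.map_cons, List.map_map]
      simp only [Nat.cast_zero, add_zero, Function.iterate_zero, id_eq, List.singleton_append]
      congr 1
      apply List.map_congr_left
      intro j hj
      simp only [Function.comp_apply, Function.iterate_succ_apply, Nat.succ_eq_add_one]
      push_cast
      rw [Prod.mk.injEq]
      exact ⟨by ring, rfl⟩
    · intro j hj
      rw [PySem.Dict.contains_insert]
      have h1 : (r + 1 + (j : Int) == r) = false := by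
        rw [beq_eq_false_iff_ne]
        omega
      have h2 : d.contains (r + 1 + (j : Int)) = false := by
        have := hc (j + 1) (by omega)
        push_cast at this
        rwa [show r + ((j : Int) + 1) = r + 1 + (j : Int) by ring] at this
      rw [h1, h2]
      rfl

-- first-hit characterisation of A's filtering loop
lemma filter_range_head (F k0 : Nat) (p : Nat → Bool) (hk : k0 < F) (hp : p k0 = true)
    (hlt : ∀ i < k0, p i = false) :
    ∃ rest, (List.range F).filter p = k0 :: rest := by
  obtain ⟨s, rfl⟩ : ∃ s, F = k0 + (s + 1) := ⟨F - k0 - 1, by omega⟩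
  rw [List.range_add, List.filter_append]
  have h1 : (List.range k0).filter p = [] := by
    apply List.filter_eq_nil_iff.mpr
    intro a ha
    rw [List.mem_range] at ha
    simp [hlt a ha]
  rw [h1, List.nil_append, List.range_succ_eq_map, List.map_cons, List.filter_cons]
  simp only [Nat.add_zero, hp, if_true]
  exact ⟨_, rfl⟩

lemma foldl_purity (M : Int) : ∀ (pairs : List (Int × Int)) (init : Int),
    (∃ kv ∈ pairs, kv.2 = M) →
    pairs.foldl (fun pu kv => if kv.2 == M then kv.2 else pu) init = M := by
  have keep : ∀ (ps : List (Int × Int)),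
      ps.foldl (fun pu kv => if kv.2 == M then kv.2 else pu) M = M := by
    intro ps
    induction ps with
    | nil => rfl
    | cons a t ih =>
      rw [List.foldl_cons]
      by_cases ha : a.2 = M
      · simpa [ha] using ih
      · simpa [ha] using ih
  intro pairs
  induction pairs with
  | nil =>
    rintro init ⟨kv, hmem, hv⟩
    simp at hmem
  | cons a t ih =>
    rintro init ⟨kv, hmem, hv⟩
    rw [List.foldl_cons]
    by_cases ha : a.2 = M
    · rw [if_pos (by simpa using ha), ha]
      exact keep t
    · rw [if_neg (by simpa using ha)]
      rcases List.mem_cons.mp hmem with rfl | hmt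
      · exact absurd hv ha
      · exact ih init ⟨kv, hmt, hv⟩

lemma max?_PL (nums : List Int) (F : Nat) (hF : 0 < F) :
    PySem.List.max? ((List.range F).map (Prot nums)) (fun y => y) = some (bestP nums (F - 1)) := by
  have hne : (List.range F).map (Prot nums) ≠ [] := by
    simp [List.range_eq_nil]
    omega
  cases hmx : PySem.List.max? ((List.range F).map (Prot nums)) (fun y => y) with
  | none => exact absurd ((PySem.List.max?_eq_none_iff _ _).mp hmx) hne
  | some m =>
    have hmem := PySem.List.max?_mem hmx
    have hmax := PySem.List.max?_isMax hmx
    obtain ⟨i, hi, rfl⟩ := List.mem_map.mp hmem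
    rw [List.mem_range] at hi
    congr 1
    apply le_antisymm
    · exact Prot_le_bestP nums (F - 1) i (by omega)
    · rw [← Prot_argP nums (F - 1)]
      exact hmax _ (List.mem_map.mpr ⟨argP nums (F - 1), List.mem_range.mpr
        (by have := argP_le nums (F - 1); omega), rfl⟩)

lemma A_result (numbers : List Int) (rotations : Int) (_h : numbers ≠ []) (hr : 0 ≤ rotations) :
    best_list_pureness numbers rotations =
      "Best pureness " ++ PySem.Int.toStr (bestP numbers rotations.toNat) ++ " after " ++
        PySem.Int.toStr ((argP numbers rotations.toNat : Nat) : Int) ++ " rotations" := by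
  have hF : (rotations + 1).toNat = rotations.toNat + 1 := by omega
  set F := rotations.toNat + 1 with hFdef
  set M := bestP numbers rotations.toNat with hM
  set k0 := argP numbers rotations.toNat with hk0
  have hk0F : k0 < F := by
    have := argP_le numbers rotations.toNat
    omega
  have hempty : ∀ j : Nat, j < F → (PySem.Dict.empty : PySem.Dict Int Int).contains ((0 : Int) + (j : Int)) = false := by
    intro j hj
    exact PySem.Dict.contains_empty _
  have hitems : (pureLoop F 0 numbers PySem.Dict.empty).items
      = (List.range F).map (fun (j : Nat) => ((j : Int), Prot numbers j)) := by
    rw [pureLoop_items F 0 numbers _ hempty]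
    have : (PySem.Dict.empty : PySem.Dict Int Int).items = [] := rfl
    rw [this, List.nil_append]
    simp [Prot]
  have hvalues : (pureLoop F 0 numbers PySem.Dict.empty).values
      = (List.range F).map (Prot numbers) := by
    simp only [PySem.Dict.values, hitems, List.map_map]
    rfl
  have hmax : PySem.List.max? ((pureLoop F 0 numbers PySem.Dict.empty).values) (fun y => y)
      = some M := by
    rw [hvalues, max?_PL numbers F (by omega)]
    simp [hM, hFdef]
  have hProtk0 : Prot numbers k0 = M := Prot_argP numbers rotations.toNat
  unfold best_list_pureness
  rw [hF]
  simp only [hmax, Option.getD_some, hitems]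
  have hsplit : ∀ (pairs : List (Int × Int)),
      pairs.foldl (fun (st : Int × List Int) kv =>
          if kv.2 == M then (kv.2, st.2 ++ [kv.1]) else st) (0, [])
      = (pairs.foldl (fun pu kv => if kv.2 == M then kv.2 else pu) 0,
         pairs.foldl (fun nd kv => if kv.2 == M then nd ++ [kv.1] else nd) []) := by
    intro pairs
    rw [show (fun (st : Int × List Int) (kv : Int × Int) =>
          if kv.2 == M then (kv.2, st.2 ++ [kv.1]) else st)
        = (fun st kv => ((fun pu (kv : Int × Int) => if kv.2 == M then kv.2 else pu) st.1 kv,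
            (fun nd (kv : Int × Int) => if kv.2 == M then nd ++ [kv.1] else nd) st.2 kv)) from by
      funext st kv
      by_cases hkv : kv.2 == M <;> simp [hkv]]
    exact PySem.List.foldl_prod_mk
      (fun pu (kv : Int × Int) => if kv.2 == M then kv.2 else pu)
      (fun nd (kv : Int × Int) => if kv.2 == M then nd ++ [kv.1] else nd) pairs 0 []
  rw [hsplit, PySem.List.foldl_append_if (fun (kv : Int × Int) => kv.2 == M) (fun kv => kv.1)]
  have hfil : (((List.range F).map (fun (j : Nat) => ((j : Int), Prot numbers j))).filter
        (fun (kv : Int × Int) => kv.2 == M))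
      = ((List.range F).filter (fun j => Prot numbers j == M)).map
          (fun (j : Nat) => ((j : Int), Prot numbers j)) := by
    rw [List.filter_map]
    rfl
  obtain ⟨rest, hrest⟩ := filter_range_head F k0 (fun j => Prot numbers j == M) hk0F
    (by simp [hProtk0]) (by
      intro i hi
      have := Prot_lt_of_lt_argP numbers rotations.toNat i (by rwa [← hk0])
      simp only [beq_eq_false_iff_ne]
      omega)
  have hpur : (((List.range F).map (fun (j : Nat) => ((j : Int), Prot numbers j))).foldl
        (fun pu kv => if kv.2 == M then kv.2 else pu) 0) = M := by
    apply foldl_purity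
    exact ⟨((k0 : Int), Prot numbers k0), List.mem_map.mpr ⟨k0, List.mem_range.mpr hk0F, rfl⟩, hProtk0⟩
  rw [hpur, hfil, hrest]
  simp

lemma B_fold (numbers : List Int) (h : numbers ≠ []) (j : Nat) :
    (PySem.List.pyRange 1 ((j : Int) + 1) 1).foldl
      (fun (st : Int × Int × Int × Int) k =>
        let p := st.1 + numbers.sum -
          (numbers.length : Int) * (PySem.List.pyGet? numbers st.2.2.2).getD 0
        let pos := if st.2.2.2 ≠ 0 then st.2.2.2 - 1 else (numbers.length : Int) - 1
        if p > st.2.1 then (p, p, k, pos) else (p, st.2.1, st.2.2.1, pos))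
      (WS numbers, WS numbers, 0, (numbers.length : Int) - 1)
    = (Prot numbers j, bestP numbers j, ((argP numbers j : Nat) : Int),
       ((numbers.length - 1 - j % numbers.length : Nat) : Int)) := by
  have hn : 0 < numbers.length := List.length_pos_iff.mpr h
  induction j with
  | zero =>
    rw [show ((0 : Nat) : Int) + 1 = 1 by norm_num, PySem.List.pyRange_one_eq_nil le_rfl]
    rw [List.foldl_nil]
    refine Prod.ext ?_ (Prod.ext ?_ (Prod.ext ?_ ?_)) <;> simp [Prot, bestP, argP]
    omega
  | succ j ih =>
    have hmlt : numbers.length - 1 - j % numbers.length < numbers.length := by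
      have := Nat.mod_lt j hn
      omega
    rw [show ((j + 1 : Nat) : Int) + 1 = ((j : Int) + 1) + 1 by push_cast; ring,
      PySem.List.pyRange_one_succ_right (by omega), List.foldl_append, ih,
      List.foldl_cons, List.foldl_nil]
    simp only []
    set m := numbers.length - 1 - j % numbers.length with hm
    have hget : (PySem.List.pyGet? numbers ((m : Nat) : Int)).getD 0 = numbers.getD m 0 := by
      rw [PySem.List.pyGet?_natCast, List.getElem?_eq_getElem hmlt,
        List.getD_eq_getElem _ _ hmlt]
      rfl
    have hp : Prot numbers j + numbers.sum -
        (numbers.length : Int) * (PySem.List.pyGet? numbers ((m : Nat) : Int)).getD 0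
        = Prot numbers (j + 1) := by
      rw [hget, Prot_succ numbers h j]
    have hpos : (if ((m : Nat) : Int) ≠ 0 then ((m : Nat) : Int) - 1
          else (numbers.length : Int) - 1)
        = ((numbers.length - 1 - (j + 1) % numbers.length : Nat) : Int) := by
      rw [mod_succ_eq j numbers.length hn]
      by_cases hc : j % numbers.length = numbers.length - 1
      · rw [if_pos hc]
        have hm0 : m = 0 := by omega
        rw [if_neg (by omega)]
        omega
      · rw [if_neg hc]
        have hjm := Nat.mod_lt j hn
        rw [if_pos (by omega)]
        omega
    rw [hp, hpos]
    by_cases hgt : Prot numbers (j + 1) > bestP numbers j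
    · rw [if_pos hgt]
      refine Prod.ext rfl (Prod.ext ?_ (Prod.ext ?_ rfl))
      · simp only [bestP]
        exact (max_eq_right hgt.le).symm
      · simp only [argP, if_pos hgt]
        push_cast
        ring
    · rw [if_neg hgt]
      refine Prod.ext rfl (Prod.ext ?_ (Prod.ext ?_ rfl))
      · simp only [bestP]
        exact (max_eq_left (not_lt.mp hgt)).symm
      · simp only [argP, if_neg hgt]

lemma B_result (numbers : List Int) (rotations : Int) (h : numbers ≠ []) (hr : 0 ≤ rotations) :
    best_list_pureness_alt numbers rotations =
      "Best pureness " ++ PySem.Int.toStr (bestP numbers rotations.toNat) ++ " after " ++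
        PySem.Int.toStr ((argP numbers rotations.toNat : Nat) : Int) ++ " rotations" := by
  have hto : rotations + 1 = ((rotations.toNat : Nat) : Int) + 1 := by omega
  simp only [best_list_pureness_alt]
  rw [hto]
  rw [show (PySem.List.enumerate numbers 0).foldl (fun acc q => acc + q.1 * q.2) 0
      = WS numbers from rfl]
  rw [B_fold numbers h rotations.toNat]

-- ===== VERDICT (by name: the statement is the Claim_ definition above) =====
theorem best_list_pureness_spec : Claim_equal_best_list_pureness := by
  intro numbers rotations _ hpre
  unfold Spec_best_list_pureness
  rw [A_result numbers rotations hpre.1 hpre.2, B_result numbers rotations hpre.1 hpre.2]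

theorem best_list_pureness_raises : Claim_raises_best_list_pureness := by
  unfold Claim_raises_best_list_pureness
  refine ⟨?_, by decide⟩
  intro numbers rotations _ hra hpre
  rcases hra with hlt | ⟨hnil, _⟩
  · exact absurd hpre.2 (by omega)
  · exact hpre.1 hnil

-- self-check: the crash-fix claim instantiated at its witness
theorem best_list_pureness_raises_witness :
    best_list_pureness_alt pvRaiseWitness_best_list_pureness.1
        pvRaiseWitness_best_list_pureness.2 = pvRaiseWitnessOut_best_list_pureness :=
  best_list_pureness_raises.2.2.2
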